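-- pv_equiv track=rewrite | github.com/trinit-ai/WORLD13 | theatres/analyzer.py | _extract_question_themes
-- ===== SOURCE A (Python) =====
-- def _extract_question_themes(output: str) -> list[str]:
--     """Extract themes from each of the Duck's three questions in the session output."""
--     themes = []
--     # Look for question markers
--     lines = output.split("\n")
--     current_theme = []
--     question_count = 0
--
--     for line in lines:
--         line_stripped = line.strip()
--         # Detect question patterns
--         if "?" in line_stripped and len(line_stripped) > 15:
--             if current_theme:
--                 themes.append(" ".join(current_theme)[:80])
--                 current_theme = []
--             question_count += 1
--             current_theme.append(line_stripped[:60])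
--         elif current_theme and line_stripped:
--             current_theme.append(line_stripped[:40])
--
--     if current_theme:
--         themes.append(" ".join(current_theme)[:80])
--
--     # Ensure we have at least 3 themes
--     while len(themes) < 3:
--         themes.append("Theme not extracted")
--
--     return themes[:3]
-- ===== SOURCE B (Python) =====
-- def _is_question(stripped: str) -> bool:
--     return "?" in stripped and len(stripped) > 15
--
--
-- def _themes_from(lines: list[str]) -> list[str]:
--     """Group the (already stripped) lines into question-led segments."""
--     themes = []
--     i, n = 0, len(lines)
--     while i < n:
--         if not _is_question(lines[i]):
--             i += 1
--             continue
--         group = [lines[i][:60]]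
--         i += 1
--         while i < n and not _is_question(lines[i]):
--             if lines[i]:
--                 group.append(lines[i][:40])
--             i += 1
--         themes.append(" ".join(group)[:80])
--     return themes
--
--
-- def _extract_question_themes(output: str) -> list[str]:
--     lines = [line.strip() for line in output.split("\n")]
--     themes = _themes_from(lines)
--     return (themes + ["Theme not extracted"] * 3)[:3]
-- ===== Notes on version B (the rewrite author's own statement) =====
-- stated objective: alternative
-- what changed: A runs one pass carrying a mutable current_theme accumulator that is flushed lazily at the next question or at end-of-input, and pads with a while loop; B first strips all lines, then scans for question lines and eagerly builds each question-led group with an inner collection loop, and pads by appending three sentinels and slicing to 3.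
import Mathlib
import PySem

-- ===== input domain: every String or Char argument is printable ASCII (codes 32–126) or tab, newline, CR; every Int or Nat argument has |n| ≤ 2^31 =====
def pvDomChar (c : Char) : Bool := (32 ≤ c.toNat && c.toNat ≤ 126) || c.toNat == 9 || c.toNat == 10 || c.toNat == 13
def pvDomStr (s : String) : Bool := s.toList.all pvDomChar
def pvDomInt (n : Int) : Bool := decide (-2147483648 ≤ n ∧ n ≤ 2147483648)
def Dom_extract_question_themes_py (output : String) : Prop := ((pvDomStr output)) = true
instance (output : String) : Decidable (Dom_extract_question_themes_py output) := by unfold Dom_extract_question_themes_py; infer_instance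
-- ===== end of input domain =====

-- B is an alternative decomposition of A: strip-all-lines first, then group by question lines
-- with an eager inner collection loop, then pad-and-slice; A keeps one lazily flushed accumulator.

-- shared helpers (both Pythons compute these same expressions literally)
-- '"?" in ls and len(ls) > 15'
def isQ (ls : List Char) : Bool := PySem.Chars.isIn ['?'] ls && decide (15 < ls.length)
-- '" ".join(g)[:80]'  ([:80] with a nonnegative literal bound is take 80 — exact)
def joinTrunc (g : List (List Char)) : String := String.ofList ((PySem.Chars.join [' '] g).take 80)

-- ===== PORT A =====
-- loop body on the already-stripped line
def aStepS (st : List String × List (List Char)) (ls : List Char) : List String × List (List Char) :=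
  if isQ ls then
    ((if st.2.isEmpty then st.1 else st.1 ++ [joinTrunc st.2]), [ls.take 60])
  else if !st.2.isEmpty && !ls.isEmpty then (st.1, st.2 ++ [ls.take 40])
  else st

-- loop body: 'line_stripped = line.strip()' then the branches
def aStep (st : List String × List (List Char)) (line : List Char) : List String × List (List Char) :=
  aStepS st (PySem.Chars.strip line)

-- the trailing 'if current_theme: themes.append(...)'
def aFinish (st : List String × List (List Char)) : List String :=
  if st.2.isEmpty then st.1 else st.1 ++ [joinTrunc st.2]

-- 'while len(themes) < 3: themes.append("Theme not extracted")'
def padLoop (themes : List String) : List String :=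
  if themes.length < 3 then padLoop (themes ++ ["Theme not extracted"]) else themes
termination_by 3 - themes.length
decreasing_by simp_all; omega

def extract_question_themes_py (output : String) : List String :=
  let lines := PySem.Chars.splitOn output.toList ['\n']
  let themes := aFinish (lines.foldl aStep ([], []))
  (padLoop themes).take 3

-- ===== PORT B =====
-- the inner 'while' collecting the non-empty body lines of one group
def collectBody : List (List Char) → List (List Char)
  | [] => []
  | l :: ls => if isQ l then [] else (if !l.isEmpty then [l.take 40] else []) ++ collectBody ls

-- the outer 'while i < n' loop of _themes_from, as recursion on the remaining lines
def themesFrom : List (List Char) → List String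
  | [] => []
  | l :: ls =>
    if isQ l then
      joinTrunc (l.take 60 :: collectBody ls) :: themesFrom (ls.dropWhile (fun x => !isQ x))
    else themesFrom ls
termination_by lines => lines.length
decreasing_by
  · have := List.length_dropWhile_le (p := fun x => !isQ x) (l := ls); simp; omega
  · simp

def extract_question_themes_py_alt (output : String) : List String :=
  let lines := (PySem.Chars.splitOn output.toList ['\n']).map PySem.Chars.strip
  (themesFrom lines ++ List.replicate 3 "Theme not extracted").take 3

-- ===== PRECONDITION & SPEC =====
def Spec_extract_question_themes_py (output : String) (out : List String) : Prop := out = extract_question_themes_py_alt output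
instance (output : String) (out : List String) : Decidable (Spec_extract_question_themes_py output out) := by unfold Spec_extract_question_themes_py; infer_instance

-- ===== CLAIM (what is proved, stated in full; the proofs are below) =====
def Claim_equal_extract_question_themes_py : Prop := ∀ (output : String), Dom_extract_question_themes_py output → Spec_extract_question_themes_py output (extract_question_themes_py output)

-- ===== LEMMAS AND PROOFS =====

-- A's loop only appends to the themes component
theorem foldl_shift (lines : List (List Char)) (t : List String) (cur : List (List Char)) :
    lines.foldl aStepS (t, cur) =
      (t ++ (lines.foldl aStepS ([], cur)).1, (lines.foldl aStepS ([], cur)).2) := by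
  induction lines generalizing t cur with
  | nil => simp
  | cons l ls ih =>
    have hstep : aStepS (t, cur) l = (t ++ (aStepS ([], cur) l).1, (aStepS ([], cur) l).2) := by
      simp only [aStepS]; split_ifs <;> simp
    simp only [List.foldl_cons, hstep]
    rw [ih, ih ((aStepS ([], cur) l).1)]
    simp

theorem aFinish_shift (lines : List (List Char)) (t : List String) (cur : List (List Char)) :
    aFinish (lines.foldl aStepS (t, cur)) = t ++ aFinish (lines.foldl aStepS ([], cur)) := by
  rw [foldl_shift]
  simp only [aFinish]
  split_ifs <;> simp

-- A's loop, started on a non-empty current theme, produces B's eager grouping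
theorem main_started (lines : List (List Char)) (cur : List (List Char)) (h : ¬ cur.isEmpty) :
    aFinish (lines.foldl aStepS ([], cur)) =
      joinTrunc (cur ++ collectBody lines) :: themesFrom (lines.dropWhile (fun x => !isQ x)) := by
  induction lines generalizing cur with
  | nil =>
    simp [aFinish, collectBody, themesFrom, h]
  | cons l ls ih =>
    by_cases hq : isQ l
    · have hstep : aStepS ([], cur) l = ([joinTrunc cur], [l.take 60]) := by
        simp [aStepS, hq, h]
      simp only [List.foldl_cons, hstep]
      rw [aFinish_shift, ih [l.take 60] (by simp)]
      simp [collectBody, hq, themesFrom, List.dropWhile]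
    · by_cases he : l.isEmpty
      · have hstep : aStepS ([], cur) l = ([], cur) := by
          simp [aStepS, hq, he]
        simp only [List.foldl_cons, hstep]
        rw [ih cur h]
        simp [collectBody, hq, he, List.dropWhile]
      · have hstep : aStepS ([], cur) l = ([], cur ++ [l.take 40]) := by
          simp [aStepS, hq, h, he]
        simp only [List.foldl_cons, hstep]
        rw [ih (cur ++ [l.take 40]) (by simp)]
        simp [collectBody, hq, he, List.dropWhile]

-- A's loop from the idle (empty current theme) state computes themesFrom
theorem main_idle (lines : List (List Char)) :
    aFinish (lines.foldl aStepS ([], [])) = themesFrom lines := by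
  induction lines with
  | nil => simp [aFinish, themesFrom]
  | cons l ls ih =>
    by_cases hq : isQ l
    · have hstep : aStepS ([], ([] : List (List Char))) l = ([], [l.take 60]) := by
        simp [aStepS, hq]
      simp only [List.foldl_cons, hstep]
      rw [main_started ls [l.take 60] (by simp)]
      simp [themesFrom, hq]
    · have hstep : aStepS ([], ([] : List (List Char))) l = ([], []) := by
        simp [aStepS, hq]
      simp only [List.foldl_cons, hstep]
      rw [ih]
      simp [themesFrom, hq]

-- the padding while-loop appends exactly 3 - len sentinels
theorem padLoop_eq (t : List String) :
    padLoop t = t ++ List.replicate (3 - t.length) "Theme not extracted" := by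
  by_cases h : t.length < 3
  · rw [padLoop]
    simp only [h, if_true]
    rw [padLoop_eq (t ++ ["Theme not extracted"])]
    have : 3 - t.length = (3 - (t ++ ["Theme not extracted"]).length) + 1 := by simp; omega
    rw [this, List.replicate_succ]
    simp
  · rw [padLoop]
    have h0 : 3 - t.length = 0 := by omega
    simp [h, h0]
  termination_by 3 - t.length
  decreasing_by simp; omega

-- padding-then-slice agrees with append-3-then-slice
theorem pad_take (t : List String) :
    (padLoop t).take 3 = (t ++ List.replicate 3 "Theme not extracted").take 3 := by
  rw [padLoop_eq, List.take_append, List.take_append]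
  congr 1
  rw [List.take_replicate, List.take_replicate]
  congr 1
  omega

-- ===== VERDICT (by name: the statement is the Claim_ definition above) =====
theorem extract_question_themes_py_spec : Claim_equal_extract_question_themes_py := by
  intro output _
  unfold Spec_extract_question_themes_py extract_question_themes_py extract_question_themes_py_alt
  have hmap : (PySem.Chars.splitOn output.toList ['\n']).foldl aStep ([], []) =
      ((PySem.Chars.splitOn output.toList ['\n']).map PySem.Chars.strip).foldl aStepS ([], []) := by
    rw [List.foldl_map]; rfl
  simp only [hmap, main_idle, pad_take]
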